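-- pv_equiv track=rewrite | github.com/choener/Prj-IsotopeSeparation | IsotopeSep/Fast5.py | moveTableToLengths
-- ===== SOURCE A (Python) =====
-- def moveTableToLengths (moveTable, stride=5):
--   ls = []
--   # go through each move
--   for m in moveTable:
--     # new event signaled by "1"
--     if m > 0:
--       ls.append(stride)
--     # same event, increase last element by stride steps, but only if there has been at least one
--     # event
--     elif (len(ls)>0):
--       ls[-1] += stride
--   return ls
-- ===== SOURCE B (Python) =====
-- def moveTableToLengths(moveTable, stride=5):
--     mt = list(moveTable)
--     pos = [i for i, m in enumerate(mt) if m > 0]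
--     if not pos:
--         return []
--     return [(q - p) * stride for p, q in zip(pos, pos[1:])] + [(len(mt) - pos[-1]) * stride]
-- ===== Notes on version B (the rewrite author's own statement) =====
-- stated objective: alternative
-- what changed: Instead of growing a list and repeatedly incrementing its last element per move, B collects the indices of positive moves once and emits each run length as a single index-difference times stride.
import Mathlib
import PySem

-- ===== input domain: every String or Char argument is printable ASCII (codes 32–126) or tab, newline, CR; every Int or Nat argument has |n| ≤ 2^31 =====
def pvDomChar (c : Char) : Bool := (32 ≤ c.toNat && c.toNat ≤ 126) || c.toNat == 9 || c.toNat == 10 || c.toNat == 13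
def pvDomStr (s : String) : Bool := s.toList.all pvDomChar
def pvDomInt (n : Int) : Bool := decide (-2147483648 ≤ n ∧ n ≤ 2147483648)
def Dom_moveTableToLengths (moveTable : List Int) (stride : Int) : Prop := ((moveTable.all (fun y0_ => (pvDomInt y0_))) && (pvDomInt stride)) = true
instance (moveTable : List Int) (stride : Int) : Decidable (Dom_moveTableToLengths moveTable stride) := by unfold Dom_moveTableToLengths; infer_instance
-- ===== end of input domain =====

-- B replaces A's append/increment-last accumulator by a one-shot positions table:
-- run lengths are consecutive differences of positive-move indices times stride (alternative decomposition, same cost).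

-- ===== PORT A =====
-- ls[-1] += stride on a nonempty list: increment the last element
def pvIncLast (ls : List Int) (s : Int) : List Int :=
  match ls with
  | [] => []
  | [x] => [x + s]
  | x :: xs => x :: pvIncLast xs s

def moveTableToLengths (moveTable : List Int) (stride : Int) : List Int :=
  moveTable.foldl (fun ls m =>
    if m > 0 then ls ++ [stride]
    else if ls.length > 0 then pvIncLast ls stride
    else ls) []

-- ===== PORT B =====
def moveTableToLengths_alt (moveTable : List Int) (stride : Int) : List Int :=
  let pos : List Int :=
    ((PySem.List.enumerate moveTable 0).filter (fun p => decide (p.2 > 0))).map (fun p => p.1)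
  if h : pos = [] then []
  else ((pos.zip (pos.drop 1)).map (fun pq => (pq.2 - pq.1) * stride))
        ++ [((moveTable.length : Int) - pos.getLast h) * stride]

-- ===== PRECONDITION & SPEC =====
def Spec_moveTableToLengths (moveTable : List Int) (stride : Int) (out : List Int) : Prop := out = moveTableToLengths_alt moveTable stride
instance (moveTable : List Int) (stride : Int) (out : List Int) : Decidable (Spec_moveTableToLengths moveTable stride out) := by unfold Spec_moveTableToLengths; infer_instance

-- ===== CLAIM (what is proved, stated in full; the proofs are below) =====
def Claim_equal_moveTableToLengths : Prop := ∀ (moveTable : List Int) (stride : Int), Dom_moveTableToLengths moveTable stride → Spec_moveTableToLengths moveTable stride (moveTableToLengths moveTable stride)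

-- ===== LEMMAS AND PROOFS =====

-- run-in-progress view of A's loop: v is the value of the last (open) run length
def pvG (stride : Int) : Int → List Int → List Int
  | v, [] => [v]
  | v, m :: r => if m > 0 then v :: pvG stride stride r else pvG stride (v + stride) r

-- positions of positive moves, starting index s (syntactically the port's pos for s = 0)
def pvPos (xs : List Int) (s : Int) : List Int :=
  ((PySem.List.enumerate xs s).filter (fun p => decide (p.2 > 0))).map (fun p => p.1)

-- differences output, recursively: pending start q, end index e
def pvDOut (stride e : Int) : Int → List Int → List Int
  | q, [] => [(e - q) * stride]
  | q, p :: ps => (p - q) * stride :: pvDOut stride e p ps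

theorem pvPos_nil (s : Int) : pvPos [] s = [] := rfl

theorem pvPos_cons (m : Int) (r : List Int) (s : Int) :
    pvPos (m :: r) s = if m > 0 then s :: pvPos r (s + 1) else pvPos r (s + 1) := by
  by_cases hm : m > 0 <;> simp [pvPos, PySem.List.enumerate_cons, hm]

theorem pvIncLast_append (acc : List Int) (v s : Int) :
    pvIncLast (acc ++ [v]) s = acc ++ [v + s] := by
  induction acc with
  | nil => rfl
  | cons a t ih =>
      cases t with
      | nil => simp [pvIncLast]
      | cons b u => simpa [pvIncLast] using ih

theorem pvFoldA (stride : Int) (xs : List Int) : ∀ (acc : List Int) (v : Int),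
    xs.foldl (fun ls m =>
      if m > 0 then ls ++ [stride]
      else if ls.length > 0 then pvIncLast ls stride
      else ls) (acc ++ [v]) = acc ++ pvG stride v xs := by
  induction xs with
  | nil => intro acc v; simp [pvG]
  | cons m r ih =>
      intro acc v
      by_cases hm : m > 0
      · simp only [List.foldl_cons, hm, if_pos, pvG]
        rw [show acc ++ [v] ++ [stride] = (acc ++ [v]) ++ [stride] from rfl,
          ih (acc ++ [v]) stride]
        simp
      · simp only [List.foldl_cons, hm, if_neg, not_false_iff]
        have hlen : (acc ++ [v]).length > 0 := by simp
        rw [if_pos hlen, pvIncLast_append, ih acc (v + stride)]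
        simp [pvG, hm]

theorem pvA_cons (m : Int) (r : List Int) (stride : Int) :
    moveTableToLengths (m :: r) stride =
      if m > 0 then pvG stride stride r else moveTableToLengths r stride := by
  by_cases hm : m > 0
  · simp only [moveTableToLengths, List.foldl_cons, hm, if_pos]
    have := pvFoldA stride r [] stride
    simpa using this
  · simp [moveTableToLengths, List.foldl_cons, hm]

-- key: the differences output of a pending run equals A's run-in-progress view
theorem pvKey (stride : Int) (xs : List Int) : ∀ (s q : Int),
    pvDOut stride (s + xs.length) q (pvPos xs s) = pvG stride ((s - q) * stride) xs := by
  induction xs with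
  | nil => intro s q; simp [pvPos_nil, pvDOut, pvG]
  | cons m r ih =>
      intro s q
      by_cases hm : m > 0
      · rw [pvPos_cons, if_pos hm]
        simp only [pvDOut, pvG, hm, if_pos]
        have e1 : s + ((m :: r).length : Int) = (s + 1) + r.length := by
          simp; ring
        rw [e1, ih (s + 1) s]
        norm_num
      · rw [pvPos_cons, if_neg hm]
        simp only [pvG, hm, if_neg, not_false_iff]
        have e1 : s + ((m :: r).length : Int) = (s + 1) + r.length := by
          simp; ring
        rw [e1, ih (s + 1) q]
        congr 1
        ring

-- the port's zip/getLast expression equals the recursive differences output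
theorem pvDOut_eq (stride e : Int) (rest : List Int) : ∀ (q : Int),
    (((q :: rest).zip ((q :: rest).drop 1)).map (fun pq => (pq.2 - pq.1) * stride))
      ++ [(e - (q :: rest).getLast (by simp)) * stride] = pvDOut stride e q rest := by
  induction rest with
  | nil => intro q; simp [pvDOut]
  | cons p ps ih =>
      intro q
      simp only [List.drop_one, List.tail_cons, List.zip_cons_cons, List.map_cons,
        List.cons_append, pvDOut]
      rw [List.getLast_cons (by simp)]
      have := ih p
      simpa [List.drop_one] using this

-- B as a function of the start index
theorem pvB_eq (stride : Int) (xs : List Int) : ∀ (s : Int),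
    (if h : pvPos xs s = [] then ([] : List Int)
     else pvDOut stride (s + xs.length) ((pvPos xs s).head h) ((pvPos xs s).tail))
      = moveTableToLengths xs stride := by
  induction xs with
  | nil => intro s; simp [pvPos_nil, moveTableToLengths]
  | cons m r ih =>
      intro s
      by_cases hm : m > 0
      · rw [pvA_cons, if_pos hm]
        have hp : pvPos (m :: r) s = s :: pvPos r (s + 1) := by
          rw [pvPos_cons, if_pos hm]
        rw [dif_neg (by simp [hp])]
        have e1 : s + ((m :: r).length : Int) = (s + 1) + r.length := by simp; ring
        simp only [hp, List.head_cons, List.tail_cons, e1]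
        rw [pvKey stride r (s + 1) s]
        norm_num
      · rw [pvA_cons, if_neg hm]
        have hp : pvPos (m :: r) s = pvPos r (s + 1) := by
          rw [pvPos_cons, if_neg hm]
        have e1 : s + ((m :: r).length : Int) = (s + 1) + r.length := by simp; ring
        rw [← ih (s + 1)]
        by_cases h0 : pvPos r (s + 1) = []
        · simp [hp, h0]
        · rw [dif_neg (by simp [hp, h0]), dif_neg h0]
          simp only [hp, e1]

-- the port's zip/getLast expression, via head/tail
theorem pvZipForm (stride e : Int) (l : List Int) (h : l ≠ []) :
    ((l.zip (l.drop 1)).map (fun pq => (pq.2 - pq.1) * stride)) ++ [(e - l.getLast h) * stride]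
      = pvDOut stride e (l.head h) l.tail := by
  cases l with
  | nil => exact absurd rfl h
  | cons q rest => simpa using pvDOut_eq stride e rest q

-- ===== VERDICT (by name: the statement is the Claim_ definition above) =====
theorem moveTableToLengths_spec : Claim_equal_moveTableToLengths := by
  intro moveTable stride _
  show moveTableToLengths moveTable stride = moveTableToLengths_alt moveTable stride
  unfold moveTableToLengths_alt
  have hpos : ((PySem.List.enumerate moveTable 0).filter (fun p => decide (p.2 > 0))).map
      (fun p => p.1) = pvPos moveTable 0 := rfl
  simp only [hpos]
  rw [← pvB_eq stride moveTable 0]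
  by_cases h : pvPos moveTable 0 = []
  · rw [dif_pos h, dif_pos h]
  · rw [dif_neg h, dif_neg h, pvZipForm stride (moveTable.length : Int) _ h]
    congr 1
    ring
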